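-- pv_equiv track=rewrite | github.com/hanhong-dot/dev | method/maya/common/hik_fun.py | _get_scr
-- ===== SOURCE A (Python) =====
-- SCLIST=['ST_VR_MB_maya_to_mb','_maya_to_mb','maya_to_mb']
--
-- def _get_scr(_hiknodes):
--     u"""
--     获得scr键
--     :param _hiknodes:
--     :return:
--     """
--     _scr=''
--     if _hiknodes :
--         for i in range(len(_hiknodes)):
--             for j in range(len(SCLIST)):
--                 if ":" not in _hiknodes[i] and SCLIST[j] in _hiknodes[i]:
--                     _scr=_hiknodes[i]
--                     break
--     return _scr
-- ===== SOURCE B (Python) =====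
-- SCLIST=['ST_VR_MB_maya_to_mb','_maya_to_mb','maya_to_mb']
--
-- def _get_scr(_hiknodes):
--     for n in reversed(_hiknodes or []):
--         if ':' not in n and any(s in n for s in SCLIST):
--             return n
--     return ''
-- ===== Notes on version B (the rewrite author's own statement) =====
-- stated objective: idiomatic
-- what changed: B scans the list from the end and returns the first matching node immediately, instead of A's exhaustive forward double loop that keeps overwriting an accumulator with the last match.
import Mathlib
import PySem

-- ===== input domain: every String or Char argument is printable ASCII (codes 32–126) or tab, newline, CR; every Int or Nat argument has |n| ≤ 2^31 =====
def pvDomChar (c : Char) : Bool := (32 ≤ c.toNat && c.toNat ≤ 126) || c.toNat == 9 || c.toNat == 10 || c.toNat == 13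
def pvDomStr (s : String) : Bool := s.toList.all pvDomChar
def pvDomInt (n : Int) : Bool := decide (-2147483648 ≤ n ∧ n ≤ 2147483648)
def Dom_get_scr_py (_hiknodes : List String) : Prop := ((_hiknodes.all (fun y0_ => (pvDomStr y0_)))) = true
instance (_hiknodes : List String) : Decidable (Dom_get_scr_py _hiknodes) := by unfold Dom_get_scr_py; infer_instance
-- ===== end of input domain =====

-- B returns the first match scanning from the end (early exit) instead of A's forward scan keeping the last match; idiomatic rewrite, return value only.

def pvSCLIST : List String := ["ST_VR_MB_maya_to_mb", "_maya_to_mb", "maya_to_mb"]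

-- ===== PORT A =====
-- inner loop 'for j in range(len(SCLIST)): if … : _scr = n; break' (break = early return of n)
def pvInnerA (n scr : String) : List Int → String
  | [] => scr
  | j :: js =>
    if (!(PySem.Str.isIn ":" n)) && PySem.Str.isIn (PySem.List.pyGetD pvSCLIST j "") n then n
    else pvInnerA n scr js

def get_scr_py (_hiknodes : List String) : String :=
  if _hiknodes ≠ [] then
    (PySem.List.pyRange 0 (PySem.List.len _hiknodes) 1).foldl
      (fun scr i => pvInnerA (PySem.List.pyGetD _hiknodes i "") scr
        (PySem.List.pyRange 0 (PySem.List.len pvSCLIST) 1)) ""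
  else ""

-- ===== PORT B =====
def pvFindB : List String → String
  | [] => ""
  | n :: rest =>
    if (!(PySem.Str.isIn ":" n)) && pvSCLIST.any (fun s => PySem.Str.isIn s n) then n
    else pvFindB rest

def get_scr_py_alt (_hiknodes : List String) : String := pvFindB _hiknodes.reverse

-- ===== PRECONDITION & SPEC =====
def Spec_get_scr_py (_hiknodes : List String) (out : String) : Prop := out = get_scr_py_alt _hiknodes
instance (_hiknodes : List String) (out : String) : Decidable (Spec_get_scr_py _hiknodes out) := by unfold Spec_get_scr_py; infer_instance

-- ===== CLAIM (what is proved, stated in full; the proofs are below) =====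
def Claim_equal_get_scr_py : Prop := ∀ (_hiknodes : List String), Dom_get_scr_py _hiknodes → Spec_get_scr_py _hiknodes (get_scr_py _hiknodes)

-- ===== LEMMAS AND PROOFS =====

def pvOk (n : String) : Bool :=
  (!(PySem.Str.isIn ":" n)) && pvSCLIST.any (fun s => PySem.Str.isIn s n)

theorem pvIf3 (c a b d : Bool) (n scr : String) :
    (if (c && a) = true then n
     else if (c && b) = true then n
     else if (c && d) = true then n else scr) =
      if (c && (a || (b || (d || false)))) = true then n else scr := by
  cases c <;> cases a <;> cases b <;> cases d <;> simp

theorem pvInnerA_eq (n scr : String) :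
    pvInnerA n scr (PySem.List.pyRange 0 (PySem.List.len pvSCLIST) 1) =
      if pvOk n then n else scr := by
  have h : PySem.List.pyRange 0 (PySem.List.len pvSCLIST) 1 = [0, 1, 2] := by decide
  have g0 : PySem.List.pyGetD ["ST_VR_MB_maya_to_mb", "_maya_to_mb", "maya_to_mb"] (0 : Int) "" = "ST_VR_MB_maya_to_mb" := rfl
  have g1 : PySem.List.pyGetD ["ST_VR_MB_maya_to_mb", "_maya_to_mb", "maya_to_mb"] (1 : Int) "" = "_maya_to_mb" := rfl
  have g2 : PySem.List.pyGetD ["ST_VR_MB_maya_to_mb", "_maya_to_mb", "maya_to_mb"] (2 : Int) "" = "maya_to_mb" := rfl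
  rw [h]
  simp only [pvInnerA, pvOk, pvSCLIST, List.any_cons, List.any_nil]
  rw [g0, g1, g2]
  exact pvIf3 (!PySem.Str.isIn ":" n) (PySem.Str.isIn "ST_VR_MB_maya_to_mb" n)
    (PySem.Str.isIn "_maya_to_mb" n) (PySem.Str.isIn "maya_to_mb" n) n scr

def pvFindD (init : String) : List String → String
  | [] => init
  | n :: rest => if pvOk n then n else pvFindD init rest

theorem pvFoldl_eq_findD (xs : List String) (init : String) :
    xs.foldl (fun scr n => if pvOk n then n else scr) init = pvFindD init xs.reverse := by
  induction xs using List.reverseRecOn generalizing init with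
  | nil => rfl
  | append_singleton ys y ih =>
      rw [List.foldl_append, List.reverse_append]
      simp only [List.foldl, List.reverse_singleton, List.singleton_append, pvFindD]
      by_cases h : pvOk y = true <;> simp [h, ih]

theorem pvFindD_empty (l : List String) : pvFindD "" l = pvFindB l := by
  induction l with
  | nil => rfl
  | cons n rest ih => simp only [pvFindD, pvFindB, pvOk, ih]

-- ===== VERDICT (by name: the statement is the Claim_ definition above) =====
theorem get_scr_py_spec : Claim_equal_get_scr_py := by
  intro xs _
  unfold Spec_get_scr_py get_scr_py get_scr_py_alt
  by_cases hne : xs = []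
  · subst hne; rfl
  · simp only [hne, ne_eq, not_false_iff, if_true]
    have : ∀ i scr, pvInnerA (PySem.List.pyGetD xs i "") scr
        (PySem.List.pyRange 0 (PySem.List.len pvSCLIST) 1) =
        (fun scr n => if pvOk n then n else scr) scr (PySem.List.pyGetD xs i "") :=
      fun i scr => pvInnerA_eq _ _
    calc (PySem.List.pyRange 0 (PySem.List.len xs) 1).foldl
          (fun scr i => pvInnerA (PySem.List.pyGetD xs i "") scr
            (PySem.List.pyRange 0 (PySem.List.len pvSCLIST) 1)) ""
        = (PySem.List.pyRange 0 (PySem.List.len xs) 1).foldl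
            (fun scr i => (fun scr n => if pvOk n then n else scr) scr
              (PySem.List.pyGetD xs i "")) "" := by
          simp only [this]
      _ = xs.foldl (fun scr n => if pvOk n then n else scr) "" :=
          PySem.List.foldl_pyRange_zero_pyGetD xs "" (fun scr n => if pvOk n then n else scr) ""
      _ = pvFindB xs.reverse := by rw [pvFoldl_eq_findD, pvFindD_empty]
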